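-- pv_equiv track=rewrite | github.com/atefawaz/QUITMATE_BACKEND | plan_services/services.py | calculate_quit_timeline
-- ===== SOURCE A (Python) =====
-- def calculate_quit_timeline(daily_cigarettes, quitting_speed):
--     """Dynamic quitting plan based on smoking level & chosen method"""
--
--     daily_targets = []
--     days_to_reduce = 0
--
--     if quitting_speed == "gradual":
--         if daily_cigarettes <= 10:
--             days_to_reduce = 90  # ~3 months
--         elif 10 < daily_cigarettes <= 20:
--             days_to_reduce = 120  # ~4 months
--         else:
--             days_to_reduce = 180  # ~6 months
--
--         reduction_step = max(1, daily_cigarettes // (days_to_reduce // 10))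
--
--         for day in range(1, days_to_reduce + 1):
--             if day % 10 == 0 and daily_cigarettes > 0:
--                 daily_cigarettes -= reduction_step
--             daily_targets.append(max(daily_cigarettes, 0))
--
--     elif quitting_speed == "cold_turkey":
--         days_to_reduce = 28  # 4 weeks total (realistic)
--         for day in range(1, days_to_reduce + 1):
--             if day <= 7:
--                 daily_cigarettes = max(1, daily_cigarettes // 2)
--             elif 7 < day <= 14:
--                 daily_cigarettes = max(1, daily_cigarettes // 3)
--             elif 14 < day <= 21:
--                 daily_cigarettes = max(1, daily_cigarettes // 4)
--             else:
--                 daily_cigarettes = 0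
--             daily_targets.append(daily_cigarettes)
--
--     return daily_targets, days_to_reduce
-- ===== SOURCE B (Python) =====
-- def calculate_quit_timeline(daily_cigarettes, quitting_speed):
--     """Dynamic quitting plan based on smoking level & chosen method."""
--     if quitting_speed == "gradual":
--         if daily_cigarettes <= 10:
--             days_to_reduce = 90
--         elif daily_cigarettes <= 20:
--             days_to_reduce = 120
--         else:
--             days_to_reduce = 180
--         reduction_step = max(1, daily_cigarettes // (days_to_reduce // 10))
--         daily_targets = [max(0, daily_cigarettes - reduction_step * (day // 10))
--                          for day in range(1, days_to_reduce + 1)]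
--         return daily_targets, days_to_reduce
--
--     if quitting_speed == "cold_turkey":
--         daily_targets = []
--         v = daily_cigarettes
--         for divisor in (2, 3, 4):
--             for _ in range(7):
--                 v = max(1, v // divisor)
--                 daily_targets.append(v)
--         daily_targets.extend([0] * 7)
--         return daily_targets, 28
--
--     return [], 0
-- ===== Notes on version B (the rewrite author's own statement) =====
-- stated objective: simpler
-- what changed: The gradual branch's mutating loop (running cigarette count decremented every 10th day with a positivity guard) is replaced by a stateless closed-form per-day target max(0, start - step*(day//10)), and the cold-turkey branch's day-number case analysis is restructured as three explicit 7-day weeks over divisors (2,3,4) followed by a block of seven zeros.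
import Mathlib
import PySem

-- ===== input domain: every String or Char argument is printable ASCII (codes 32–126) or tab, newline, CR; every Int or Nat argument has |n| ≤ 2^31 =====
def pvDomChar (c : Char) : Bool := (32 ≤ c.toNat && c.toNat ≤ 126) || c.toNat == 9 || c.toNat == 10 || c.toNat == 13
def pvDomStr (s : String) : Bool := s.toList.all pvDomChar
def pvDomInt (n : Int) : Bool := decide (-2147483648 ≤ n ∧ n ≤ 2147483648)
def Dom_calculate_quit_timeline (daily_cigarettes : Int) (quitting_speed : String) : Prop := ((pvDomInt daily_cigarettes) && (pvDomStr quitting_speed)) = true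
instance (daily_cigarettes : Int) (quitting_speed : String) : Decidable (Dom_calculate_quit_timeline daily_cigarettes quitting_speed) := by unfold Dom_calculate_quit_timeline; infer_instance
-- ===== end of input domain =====

-- B replaces A's mutating gradual loop by a closed-form per-day formula (no running
-- accumulator) and restructures the cold-turkey loop as three 7-day weeks plus a block
-- of zeros; objective: simpler.

-- ===== PORT A =====
def calculate_quit_timeline (daily_cigarettes : Int) (quitting_speed : String) : List Int × Int :=
  if quitting_speed == "gradual" then
    let days_to_reduce : Int :=
      if daily_cigarettes ≤ 10 then 90
      else if 10 < daily_cigarettes ∧ daily_cigarettes ≤ 20 then 120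
      else 180
    let reduction_step := max 1 (PySem.Int.floordiv daily_cigarettes (PySem.Int.floordiv days_to_reduce 10))
    let st := (PySem.List.pyRange 1 (days_to_reduce + 1) 1).foldl
      (fun (st : Int × List Int) day =>
        let d := if PySem.Int.mod day 10 = 0 ∧ 0 < st.1 then st.1 - reduction_step else st.1
        (d, st.2 ++ [max d 0]))
      (daily_cigarettes, [])
    (st.2, days_to_reduce)
  else if quitting_speed == "cold_turkey" then
    let days_to_reduce : Int := 28
    let st := (PySem.List.pyRange 1 (days_to_reduce + 1) 1).foldl
      (fun (st : Int × List Int) day =>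
        let d :=
          if day ≤ 7 then max 1 (PySem.Int.floordiv st.1 2)
          else if 7 < day ∧ day ≤ 14 then max 1 (PySem.Int.floordiv st.1 3)
          else if 14 < day ∧ day ≤ 21 then max 1 (PySem.Int.floordiv st.1 4)
          else 0
        (d, st.2 ++ [d]))
      (daily_cigarettes, [])
    (st.2, days_to_reduce)
  else ([], 0)

-- ===== PORT B =====
def calculate_quit_timeline_alt (daily_cigarettes : Int) (quitting_speed : String) : List Int × Int :=
  if quitting_speed == "gradual" then
    let days_to_reduce : Int :=
      if daily_cigarettes ≤ 10 then 90
      else if daily_cigarettes ≤ 20 then 120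
      else 180
    let reduction_step := max 1 (PySem.Int.floordiv daily_cigarettes (PySem.Int.floordiv days_to_reduce 10))
    ((PySem.List.pyRange 1 (days_to_reduce + 1) 1).map
       (fun day => max 0 (daily_cigarettes - reduction_step * PySem.Int.floordiv day 10)),
     days_to_reduce)
  else if quitting_speed == "cold_turkey" then
    let st := [(2 : Int), 3, 4].foldl
      (fun (st : Int × List Int) divisor =>
        (PySem.List.pyRange 0 7 1).foldl
          (fun (st : Int × List Int) _ =>
            let v := max 1 (PySem.Int.floordiv st.1 divisor)
            (v, st.2 ++ [v]))
          st)
      (daily_cigarettes, [])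
    (st.2 ++ List.replicate 7 0, 28)
  else ([], 0)

-- ===== PRECONDITION & SPEC =====
def Spec_calculate_quit_timeline (daily_cigarettes : Int) (quitting_speed : String) (out : List Int × Int) : Prop := out = calculate_quit_timeline_alt daily_cigarettes quitting_speed
instance (daily_cigarettes : Int) (quitting_speed : String) (out : List Int × Int) : Decidable (Spec_calculate_quit_timeline daily_cigarettes quitting_speed out) := by unfold Spec_calculate_quit_timeline; infer_instance

-- ===== CLAIM (what is proved, stated in full; the proofs are below) =====
def Claim_equal_calculate_quit_timeline : Prop := ∀ (daily_cigarettes : Int) (quitting_speed : String), Dom_calculate_quit_timeline daily_cigarettes quitting_speed → Spec_calculate_quit_timeline daily_cigarettes quitting_speed (calculate_quit_timeline daily_cigarettes quitting_speed)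

-- ===== LEMMAS AND PROOFS =====

-- A's gradual loop body, named for the proofs (definitionally equal to the lambda in the port).
def gradStep (step : Int) (st : Int × List Int) (day : Int) : Int × List Int :=
  let d := if PySem.Int.mod day 10 = 0 ∧ 0 < st.1 then st.1 - step else st.1
  (d, st.2 ++ [max d 0])

lemma gradStep_eq (step : Int) :
    (fun (st : Int × List Int) day =>
      let d := if PySem.Int.mod day 10 = 0 ∧ 0 < st.1 then st.1 - step else st.1
      (d, st.2 ++ [max d 0])) = gradStep step := rfl

-- Invariant for A's gradual loop after the first m days (state = (current value, targets)):
-- the emitted targets follow B's closed form, and the running value is determined up to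
-- clamping by the closed form.
lemma gradual_loop_inv (d0 step : Int) (hstep : 1 ≤ step) (m : Nat) :
    ((PySem.List.pyRange 1 ((m : Int) + 1) 1).foldl (gradStep step) (d0, [])).2
      = (PySem.List.pyRange 1 ((m : Int) + 1) 1).map
          (fun day => max 0 (d0 - step * PySem.Int.floordiv day 10))
    ∧ max ((PySem.List.pyRange 1 ((m : Int) + 1) 1).foldl (gradStep step) (d0, [])).1 0
        = max (d0 - step * ((m / 10 : Nat) : Int)) 0
    ∧ (0 < ((PySem.List.pyRange 1 ((m : Int) + 1) 1).foldl (gradStep step) (d0, [])).1 →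
        ((PySem.List.pyRange 1 ((m : Int) + 1) 1).foldl (gradStep step) (d0, [])).1
          = d0 - step * ((m / 10 : Nat) : Int)) := by
  induction m with
  | zero =>
    simp [PySem.List.pyRange_one_eq_nil]
  | succ m ih =>
    have hsplit : PySem.List.pyRange 1 ((↑(m + 1) : Int) + 1) 1
        = PySem.List.pyRange 1 ((m : Int) + 1) 1 ++ [(m : Int) + 1] := by
      have := PySem.List.pyRange_one_succ_right (a := 1) (b := (m : Int) + 1)
        (by have : (0:Int) ≤ (m:Int) := Int.natCast_nonneg m; omega)
      push_cast
      push_cast at this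
      exact this
    obtain ⟨ih1, ih2, ih3⟩ := ih
    rw [hsplit, List.foldl_append, List.map_append]
    set st := ((PySem.List.pyRange 1 ((m : Int) + 1) 1).foldl (gradStep step) (d0, [])) with hst
    have hmod : PySem.Int.mod ((m : Int) + 1) 10 = (((m + 1) % 10 : Nat) : Int) := by
      have := PySem.Int.mod_natCast (m + 1) 10
      push_cast at this ⊢
      exact_mod_cast this
    have hdiv : PySem.Int.floordiv ((m : Int) + 1) 10 = (((m + 1) / 10 : Nat) : Int) := by
      have := PySem.Int.floordiv_natCast (m + 1) 10
      push_cast at this ⊢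
      exact_mod_cast this
    simp only [List.foldl_cons, List.foldl_nil, List.map_cons, List.map_nil]
    by_cases h10 : (m + 1) % 10 = 0
    · -- day (m+1) is a multiple of 10
      have hq : (((m + 1) / 10 : Nat) : Int) = ((m / 10 : Nat) : Int) + 1 := by
        have : (m + 1) / 10 = m / 10 + 1 := by omega
        rw [this]; push_cast; ring
      have hm0 : PySem.Int.mod ((m : Int) + 1) 10 = 0 := by
        rw [hmod, h10]; rfl
      by_cases hpos : 0 < st.1
      · have hval : st.1 = d0 - step * ((m / 10 : Nat) : Int) := ih3 hpos
        have hgs : gradStep step st ((m : Int) + 1)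
            = (st.1 - step, st.2 ++ [max (st.1 - step) 0]) := by
          simp only [gradStep, if_pos (And.intro hm0 hpos)]
        rw [hgs]
        have hnew : st.1 - step = d0 - step * (((m + 1) / 10 : Nat) : Int) := by
          rw [hval, hq]; ring
        refine ⟨?_, ?_, ?_⟩
        · rw [ih1]
          rw [hnew, hdiv, max_comm]
        · rw [hnew]
        · intro _; rw [hnew]
      · have hgs : gradStep step st ((m : Int) + 1)
            = (st.1, st.2 ++ [max st.1 0]) := by
          simp only [gradStep]
          rw [if_neg (by intro h; exact hpos h.2)]
        rw [hgs]
        have hle : st.1 ≤ 0 := by omega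
        have hclosed : d0 - step * ((m / 10 : Nat) : Int) ≤ 0 := by omega
        have hclosed2 : d0 - step * (((m + 1) / 10 : Nat) : Int) ≤ 0 := by
          rw [hq]; nlinarith
        refine ⟨?_, ?_, ?_⟩
        · rw [ih1]
          rw [hdiv, max_eq_right hle, max_eq_left hclosed2]
        · show max st.1 0 = _
          rw [max_eq_right hle, max_eq_right hclosed2]
        · intro h; exact absurd h (not_lt.mpr hle)
    · -- not a multiple of 10: value unchanged
      have hq : (((m + 1) / 10 : Nat) : Int) = ((m / 10 : Nat) : Int) := by
        have : (m + 1) / 10 = m / 10 := by omega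
        rw [this]
      have hmodne : ¬ (PySem.Int.mod ((m : Int) + 1) 10 = 0) := by
        rw [hmod]; exact_mod_cast h10
      have hgs : gradStep step st ((m : Int) + 1)
          = (st.1, st.2 ++ [max st.1 0]) := by
        simp only [gradStep]
        rw [if_neg (by intro h; exact hmodne h.1)]
      rw [hgs]
      have helem : max st.1 0 = max 0 (d0 - step * ((m / 10 : Nat) : Int)) :=
        ih2.trans (max_comm _ _)
      refine ⟨?_, ?_, ?_⟩
      · show st.2 ++ [max st.1 0] = _
        rw [ih1, hdiv, hq, helem]
      · show max st.1 0 = _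
        rw [hq]
        exact ih2
      · intro h
        show st.1 = _
        rw [hq]
        exact ih3 h

-- Specialisation giving exactly the targets-list equality at a literal day count.
lemma gradual_targets_eq (d0 step : Int) (hstep : 1 ≤ step) (days : Int) (m : Nat)
    (hm : (m : Int) = days) :
    ((PySem.List.pyRange 1 (days + 1) 1).foldl (gradStep step) (d0, [])).2
      = (PySem.List.pyRange 1 (days + 1) 1).map
          (fun day => max 0 (d0 - step * PySem.Int.floordiv day 10)) := by
  subst hm
  exact (gradual_loop_inv d0 step hstep m).1

-- ===== VERDICT (by name: the statement is the Claim_ definition above) =====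
theorem calculate_quit_timeline_spec : Claim_equal_calculate_quit_timeline := by
  intro d s _
  unfold Spec_calculate_quit_timeline calculate_quit_timeline calculate_quit_timeline_alt
  by_cases hg : s == "gradual"
  · simp only [hg, if_true]
    have hbr : (if d ≤ 10 then (90:Int) else if 10 < d ∧ d ≤ 20 then 120 else 180)
        = (if d ≤ 10 then (90:Int) else if d ≤ 20 then 120 else 180) := by
      by_cases h1 : d ≤ 10
      · simp [h1]
      · simp [h1]; omega
    rw [hbr, gradStep_eq]
    by_cases h1 : d ≤ 10
    · simp only [h1, if_true]
      rw [gradual_targets_eq d _ (le_max_left _ _) 90 90 (by norm_num)]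
    · by_cases h2 : d ≤ 20
      · simp only [h1, h2, if_true, if_false]
        rw [gradual_targets_eq d _ (le_max_left _ _) 120 120 (by norm_num)]
      · simp only [h1, h2, if_false]
        rw [gradual_targets_eq d _ (le_max_left _ _) 180 180 (by norm_num)]
  · by_cases hc : s == "cold_turkey"
    · simp only [hg, hc, if_true]
      rw [show PySem.List.pyRange 1 (28 + 1) 1
            = [1,2,3,4,5,6,7,8,9,10,11,12,13,14,15,16,17,18,19,20,21,22,23,24,25,26,27,28]
          from by decide,
          show PySem.List.pyRange 0 7 1 = [0,1,2,3,4,5,6] from by decide]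
      norm_num [List.replicate]
    · simp [hg, hc]
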